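-- pv_equiv track=rewrite | github.com/vtheno/lightWeb | test/test.py | ll
-- ===== SOURCE A (Python) =====
-- def ll(inp):
--     temp = ''
--     count = 2
--     while inp and inp[0] == '{' and count > 0:
--         temp += inp[0]
--         inp = inp[1:]
--         count -= 1
--     if temp:
--         return temp,inp
-- ===== SOURCE B (Python) =====
-- import re
--
-- def ll(inp):
--     temp = re.match(r'\{{0,2}', inp).group()
--     if temp:
--         return temp, inp[len(temp):]
-- ===== Notes on version B (the rewrite author's own statement) =====
-- stated objective: idiomatic
-- what changed: The char-by-char consume-and-slice while loop is replaced by a single regex prefix match r'\{{0,2}' that grabs the up-to-two leading braces in closed form and slices once.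
import Mathlib
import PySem

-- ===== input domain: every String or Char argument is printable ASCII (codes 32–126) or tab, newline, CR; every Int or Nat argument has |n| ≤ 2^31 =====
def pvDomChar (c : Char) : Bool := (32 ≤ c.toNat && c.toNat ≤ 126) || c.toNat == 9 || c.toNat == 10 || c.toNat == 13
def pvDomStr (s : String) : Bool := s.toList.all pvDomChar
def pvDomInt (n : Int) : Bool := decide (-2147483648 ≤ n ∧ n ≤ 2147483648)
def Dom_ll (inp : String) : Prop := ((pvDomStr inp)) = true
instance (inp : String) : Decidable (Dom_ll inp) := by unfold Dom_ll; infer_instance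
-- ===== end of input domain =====

-- B replaces the char-by-char consume-and-slice loop with one closed-form regex prefix match (idiomatic).

-- ===== PORT A =====
-- the while loop over state (temp, inp, count); count starts at 2 and strictly decreases
def llLoop (temp : List Char) (inp : List Char) (count : Nat) : List Char × List Char :=
  match inp, count with
  | c :: rest, k + 1 =>
    if c = '{' then llLoop (temp ++ [c]) rest k else (temp, c :: rest)
  | inp, _ => (temp, inp)

def ll (inp : String) : Option (String × String) :=
  let (temp, rest) := llLoop [] inp.toList 2
  if temp ≠ [] then some (String.mk temp, String.mk rest) else none

-- ===== PORT B =====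
-- re.match(r'\{{0,2}', inp).group() = the first min(2, run-length) leading '{' chars
def ll_alt (inp : String) : Option (String × String) :=
  let n := min 2 (inp.toList.takeWhile (· = '{')).length
  if n > 0 then some (String.mk (inp.toList.take n), String.mk (inp.toList.drop n)) else none

-- ===== PRECONDITION & SPEC =====
def Spec_ll (inp : String) (out : Option (String × String)) : Prop := out = ll_alt inp
instance (inp : String) (out : Option (String × String)) : Decidable (Spec_ll inp out) := by unfold Spec_ll; infer_instance

-- ===== CLAIM (what is proved, stated in full; the proofs are below) =====
def Claim_equal_ll : Prop := ∀ (inp : String), Dom_ll inp → Spec_ll inp (ll inp)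

-- ===== LEMMAS AND PROOFS =====
theorem ll_eq_alt (inp : String) : ll inp = ll_alt inp := by
  unfold ll ll_alt
  cases h : inp.toList with
  | nil => simp [llLoop]
  | cons c t =>
    by_cases hc : c = '{'
    · cases t with
      | nil => simp [llLoop, hc]
      | cons c' t' =>
        by_cases hc' : c' = '{' <;>
          simp [llLoop, hc, hc', List.takeWhile]
    · simp [llLoop, hc, List.takeWhile]

-- ===== VERDICT (by name: the statement is the Claim_ definition above) =====
theorem ll_spec : Claim_equal_ll := by
  intro inp _
  unfold Spec_ll
  exact ll_eq_alt inp
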